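-- pv_equiv track=rewrite | github.com/emptymahbob/sipg | sipg/core.py | name_matches_domain_suffix
-- ===== SOURCE A (Python) =====
-- from typing import List, Optional, Iterator, Dict, Any, Set
--
-- def name_matches_domain_suffix(name: str, suffixes: List[str]) -> bool:
--     """True if hostname/domain ends at a label boundary with one of the suffixes.
--
--     `army.mil` matches suffix `mil`; `mapshare.dsa.mil.ng` does not (ends with `.mil.ng`).
--     """
--     n = name.strip().lower()
--     if not n:
--         return False
--     for suf in suffixes:
--         if n == suf or n.endswith("." + suf):
--             return True
--     return False
-- ===== SOURCE B (Python) =====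
-- def name_matches_domain_suffix(name, suffixes):
--     """True if hostname/domain ends at a label boundary with one of the suffixes."""
--     suffix_set = set(suffixes)
--     n = name.strip().lower()
--     if not n:
--         return False
--     if n in suffix_set:
--         return True
--     return any(c == '.' and n[i + 1:] in suffix_set for i, c in enumerate(n))
-- ===== Notes on version B (the rewrite author's own statement) =====
-- stated objective: idiomatic
-- what changed: Instead of scanning the suffix list and doing an endswith per suffix, B builds a set of the suffixes once and iterates the name's label boundaries (dots), testing each tail by set membership.
import Mathlib
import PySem

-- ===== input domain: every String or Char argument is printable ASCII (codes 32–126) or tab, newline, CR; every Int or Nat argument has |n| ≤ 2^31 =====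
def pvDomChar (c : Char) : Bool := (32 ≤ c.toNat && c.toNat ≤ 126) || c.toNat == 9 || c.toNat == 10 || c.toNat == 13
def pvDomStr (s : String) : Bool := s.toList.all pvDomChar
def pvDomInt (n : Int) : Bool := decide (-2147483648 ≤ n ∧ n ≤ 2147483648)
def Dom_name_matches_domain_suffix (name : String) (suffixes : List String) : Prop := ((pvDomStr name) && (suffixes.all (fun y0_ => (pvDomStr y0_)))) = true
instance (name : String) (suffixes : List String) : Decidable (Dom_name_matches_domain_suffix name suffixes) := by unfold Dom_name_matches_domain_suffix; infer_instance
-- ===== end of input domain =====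

-- B replaces A's per-suffix endswith scan by a set of the suffixes plus one pass over the name's label boundaries (idiomatic; same return value).

-- ===== PORT A =====
def name_matches_domain_suffix (name : String) (suffixes : List String) : Bool :=
  let n := PySem.Str.lower (PySem.Str.strip name)
  if n = "" then false
  else suffixes.any (fun suf => n == suf || PySem.Str.endswith n ("." ++ suf))

-- ===== PORT B =====
def name_matches_domain_suffix_alt (name : String) (suffixes : List String) : Bool :=
  let suffixSet : PySem.Set String := PySem.Set.ofList suffixes
  let n := PySem.Str.lower (PySem.Str.strip name)
  if n = "" then false
  else if PySem.Set.contains suffixSet n then true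
  else (PySem.List.enumerate n.toList).any fun p =>
    p.2 == '.' && PySem.Set.contains suffixSet (PySem.Str.slice n (some (p.1 + 1)) none)

-- ===== PRECONDITION & SPEC =====
def Spec_name_matches_domain_suffix (name : String) (suffixes : List String) (out : Bool) : Prop := out = name_matches_domain_suffix_alt name suffixes
instance (name : String) (suffixes : List String) (out : Bool) : Decidable (Spec_name_matches_domain_suffix name suffixes out) := by unfold Spec_name_matches_domain_suffix; infer_instance

-- ===== CLAIM (what is proved, stated in full; the proofs are below) =====
def Claim_equal_name_matches_domain_suffix : Prop := ∀ (name : String) (suffixes : List String), Dom_name_matches_domain_suffix name suffixes → Spec_name_matches_domain_suffix name suffixes (name_matches_domain_suffix name suffixes)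

-- ===== LEMMAS AND PROOFS =====

-- '.'::t is a suffix of m iff m has a '.' at some position k with exactly t after it.
theorem dot_suffix_iff (m t : List Char) :
    ('.' :: t) <:+ m ↔ ∃ k : Nat, ∃ h : k < m.length, m[k] = '.' ∧ m.drop (k + 1) = t := by
  constructor
  · rintro ⟨u, rfl⟩
    refine ⟨u.length, by simp, ?_, ?_⟩
    · simp
    · simp [List.drop_append]
  · rintro ⟨k, h, hdot, hdrop⟩
    refine ⟨m.take k, ?_⟩
    conv_rhs => rw [← List.take_append_drop k m]
    rw [List.drop_eq_getElem_cons h, hdot, hdrop]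

-- n[k+1:] on the string side is drop (k+1) on the character list (indices from enumerate are 0 + k).
theorem slice_toList (n : String) (k : Nat) :
    (PySem.Str.slice n (some ((0:Int) + k + 1)) none).toList = n.toList.drop (k + 1) := by
  have h : ((0:Int) + k + 1) = ((k + 1 : Nat) : Int) := by push_cast; ring
  rw [h]
  simp only [PySem.Str.toList_slice, PySem.Chars.slice_eq_listSlice, PySem.List.slice_from_natCast]

-- A's existential over suffixes equals B's set-membership scan over the dots of n (the non-member case).
theorem core_iff (n : String) (suffixes : List String) (hc : n ∉ suffixes) :
    (∃ x ∈ suffixes, n = x ∨ ("." ++ x).toList <:+ n.toList) ↔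
    ((PySem.List.enumerate n.toList).any fun p =>
        p.2 == '.' && (PySem.Set.ofList suffixes).contains (PySem.Str.slice n (some (p.1 + 1)) none)) = true := by
  simp only [List.any_eq_true, Bool.and_eq_true, beq_iff_eq, PySem.Set.contains_iff,
    PySem.Set.mem_ofList, PySem.List.mem_enumerate_iff]
  have htl : ∀ x : String, ("." ++ x).toList = '.' :: x.toList := by intro x; simp
  constructor
  · rintro ⟨x, hx, (rfl | hsuf)⟩
    · exact absurd hx hc
    · rw [htl, dot_suffix_iff] at hsuf
      obtain ⟨k, hk, hdot, hdrop⟩ := hsuf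
      refine ⟨((0:Int) + k, n.toList[k]), ⟨k, hk, rfl⟩, hdot, ?_⟩
      have hx' : PySem.Str.slice n (some ((0:Int) + k + 1)) none = x :=
        String.toList_inj.mp (by rw [slice_toList, hdrop])
      rw [hx']
      exact hx
  · rintro ⟨p, ⟨k, hk, rfl⟩, hdot, hmem⟩
    refine ⟨_, hmem, Or.inr ?_⟩
    rw [htl, dot_suffix_iff]
    exact ⟨k, hk, hdot, (slice_toList n k).symm⟩

-- ===== VERDICT (by name: the statement is the Claim_ definition above) =====
theorem name_matches_domain_suffix_spec : Claim_equal_name_matches_domain_suffix := by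
  intro name suffixes _
  unfold Spec_name_matches_domain_suffix name_matches_domain_suffix name_matches_domain_suffix_alt
  set n := PySem.Str.lower (PySem.Str.strip name) with hn
  by_cases h : n = ""
  · simp [h]
  · simp only [if_neg h]
    by_cases hc : n ∈ suffixes
    · have ht : PySem.Set.contains (PySem.Set.ofList suffixes) n = true := by
        simp [PySem.Set.mem_ofList]; exact hc
      rw [if_pos ht]
      rw [Bool.eq_iff_iff]
      simp only [List.any_eq_true, Bool.or_eq_true, beq_iff_eq]
      exact iff_of_true ⟨n, hc, Or.inl rfl⟩ trivial
    · have hf : ¬ PySem.Set.contains (PySem.Set.ofList suffixes) n = true := by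
        simp [PySem.Set.mem_ofList]; exact hc
      rw [if_neg hf]
      rw [Bool.eq_iff_iff]
      simp only [List.any_eq_true, Bool.or_eq_true, beq_iff_eq,
        PySem.Str.endswith_eq, PySem.Chars.endswith_iff]
      exact (core_iff n suffixes hc).trans List.any_eq_true
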